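-- pv_equiv track=rewrite | github.com/lakefusionai/lakefusion-app-deploy | dbx_pipeline_artifacts/src/maven-core-deduplication/Process Match - Merge Records.py | apply_source_system_strategy_multi_merge
-- ===== SOURCE A (Python) =====
-- def apply_source_system_strategy_multi_merge(attribute, strategyRule, all_attr_infos, ignore_null=False):
--     """
--     Apply source system strategy for multi-record merge
--     Compare sources based on survivorship rule priority across all records
--     """
--     best_value = None
--     best_source = None
--     best_priority = float('inf')
--
--     for attr_info in all_attr_infos:
--         source = attr_info.get('source')
--         value = attr_info.get('value')
--
--         # Apply ignore_null logic
--         if ignore_null and (value is None or value == ""):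
--             continue
--
--         if source in strategyRule:
--             priority = strategyRule.index(source)
--             if priority < best_priority:
--                 best_priority = priority
--                 best_value = value
--                 best_source = source
--
--     # If no value found in priority sources, look for any non-null value
--     if best_value is None:
--         for attr_info in all_attr_infos:
--             value = attr_info.get('value')
--             if value is not None:
--                 if not ignore_null or value != "":
--                     best_value = value
--                     best_source = attr_info.get('source')
--                     break
--
--     return best_value, best_source
-- ===== SOURCE B (Python) =====
-- def apply_source_system_strategy_multi_merge(attribute, strategyRule, all_attr_infos, ignore_null=False):
--     # One pass: index the first usable record of each source (skipping null/''
--     # values only when ignore_null), so no running best-priority state is needed.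
--     first_by_source = {}
--     for r in all_attr_infos:
--         v = r.get('value')
--         if ignore_null and (v is None or v == ""):
--             continue
--         s = r.get('source')
--         if s not in first_by_source:
--             first_by_source[s] = r
--     best_value = None
--     best_source = None
--     # Walk the survivorship rule in priority order; first source with a record wins.
--     for source in strategyRule:
--         rec = first_by_source.get(source)
--         if rec is not None:
--             best_value = rec.get('value')
--             best_source = source
--             break
--     # If no value found in priority sources, look for any non-null value
--     if best_value is None:
--         for attr_info in all_attr_infos:
--             value = attr_info.get('value')
--             if value is not None:
--                 if not ignore_null or value != "":
--                     best_value = value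
--                     best_source = attr_info.get('source')
--                     break
--     return best_value, best_source
-- ===== Notes on version B (the rewrite author's own statement) =====
-- stated objective: alternative
-- what changed: Instead of one pass over the records with a running best_priority/min state and an 'in'/list.index scan per record, B builds a first-eligible-record-per-source hash index in one pass and then walks the strategy rule in priority order with an early exit; no min-tracking state remains.
import Mathlib
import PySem

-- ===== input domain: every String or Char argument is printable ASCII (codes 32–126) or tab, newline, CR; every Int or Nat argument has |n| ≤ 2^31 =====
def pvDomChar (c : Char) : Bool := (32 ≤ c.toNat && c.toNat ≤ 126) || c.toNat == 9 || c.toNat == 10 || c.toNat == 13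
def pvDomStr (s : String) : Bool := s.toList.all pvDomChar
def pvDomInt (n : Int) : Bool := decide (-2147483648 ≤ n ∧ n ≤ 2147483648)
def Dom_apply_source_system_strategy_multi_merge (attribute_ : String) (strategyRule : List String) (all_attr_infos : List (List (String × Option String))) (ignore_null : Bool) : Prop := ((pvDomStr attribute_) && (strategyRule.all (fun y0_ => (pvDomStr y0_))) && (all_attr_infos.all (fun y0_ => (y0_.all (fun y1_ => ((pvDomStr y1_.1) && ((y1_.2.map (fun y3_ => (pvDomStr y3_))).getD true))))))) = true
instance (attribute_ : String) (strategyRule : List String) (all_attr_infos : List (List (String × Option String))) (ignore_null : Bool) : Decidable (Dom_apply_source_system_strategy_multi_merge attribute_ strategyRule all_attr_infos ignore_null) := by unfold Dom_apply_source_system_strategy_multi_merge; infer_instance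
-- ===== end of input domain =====

-- B replaces A's record pass with a running best-priority/min state (and a list.index
-- scan per record) by a one-pass first-eligible-record-per-source hash index followed by
-- an early-exit walk over the strategy rule in priority order (objective: alternative).

-- ===== PORT A =====
-- attr_info.get(k): dict → assoc list, first-match lookup; missing key gives Python None = none
def pvGet (r : List (String × Option String)) (k : String) : Option String :=
  ((r.find? (fun p => p.1 == k)).map (·.2)).getD none

-- fallback predicate shared verbatim by A's and B's Python: value is not None and (not ignore_null or value != "")
def pvFallbackOk (ignore_null : Bool) (v : Option String) : Bool :=
  v != none && (!ignore_null || v != some "")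

-- the loop body of A; state = (best_value, best_source, best_priority), best_priority = none is float('inf')
def pvStepA (strategyRule : List String) (ignore_null : Bool)
    (st : Option String × Option String × Option Nat)
    (attr_info : List (String × Option String)) : Option String × Option String × Option Nat :=
  let source := pvGet attr_info "source"
  let value := pvGet attr_info "value"
  if ignore_null && (value == none || value == some "") then st
  else
    match source with
    | some s =>
      if strategyRule.contains s then
        match PySem.List.index? strategyRule s with
        | some priority =>
          if (match st.2.2 with | none => true | some b => priority < b) then
            (value, some s, some priority)
          else st
        | none => st   -- unreachable: s ∈ strategyRule
      else st
    | none => st   -- Python: None is never `in` a list of strings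

def apply_source_system_strategy_multi_merge (attribute_ : String) (strategyRule : List String) (all_attr_infos : List (List (String × Option String))) (ignore_null : Bool) : Option String × Option String :=
  let st := all_attr_infos.foldl (pvStepA strategyRule ignore_null) (none, none, none)
  match st.1 with
  | some v => (some v, st.2.1)
  | none =>
    match all_attr_infos.find? (fun r => pvFallbackOk ignore_null (pvGet r "value")) with
    | some r => (pvGet r "value", pvGet r "source")
    | none => (none, st.2.1)

-- ===== PORT B =====
-- the body of Source B's indexing loop: first eligible record per source
def pvIndexStep (ignore_null : Bool)
    (d : PySem.Dict (Option String) (List (String × Option String)))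
    (r : List (String × Option String)) : PySem.Dict (Option String) (List (String × Option String)) :=
  if ignore_null && (pvGet r "value" == none || pvGet r "value" == some "") then d
  else
    let s := pvGet r "source"
    if d.contains s then d else d.insert s r

-- B's priority loop: walk the rule in order, early exit on the first source with a record
def pvPickBySource (d : PySem.Dict (Option String) (List (String × Option String))) :
    List String → Option (Option String × String)
  | [] => none
  | s :: rest =>
    match d.get? (some s) with
    | some r => some (pvGet r "value", s)
    | none => pvPickBySource d rest

def apply_source_system_strategy_multi_merge_alt (attribute_ : String) (strategyRule : List String) (all_attr_infos : List (List (String × Option String))) (ignore_null : Bool) : Option String × Option String :=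
  let first_by_source := all_attr_infos.foldl (pvIndexStep ignore_null) PySem.Dict.empty
  match pvPickBySource first_by_source strategyRule with
  | some (some v, s) => (some v, some s)
  | best =>
    let bs : Option String := match best with | some (_, s) => some s | none => none
    match all_attr_infos.find? (fun r => pvFallbackOk ignore_null (pvGet r "value")) with
    | some r => (pvGet r "value", pvGet r "source")
    | none => (none, bs)

-- ===== PRECONDITION & SPEC =====
def Spec_apply_source_system_strategy_multi_merge (attribute_ : String) (strategyRule : List String) (all_attr_infos : List (List (String × Option String))) (ignore_null : Bool) (out : Option String × Option String) : Prop := out = apply_source_system_strategy_multi_merge_alt attribute_ strategyRule all_attr_infos ignore_null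
instance (attribute_ : String) (strategyRule : List String) (all_attr_infos : List (List (String × Option String))) (ignore_null : Bool) (out : Option String × Option String) : Decidable (Spec_apply_source_system_strategy_multi_merge attribute_ strategyRule all_attr_infos ignore_null out) := by unfold Spec_apply_source_system_strategy_multi_merge; infer_instance

-- ===== CLAIM (what is proved, stated in full; the proofs are below) =====
def Claim_equal_apply_source_system_strategy_multi_merge : Prop := ∀ (attribute_ : String) (strategyRule : List String) (all_attr_infos : List (List (String × Option String))) (ignore_null : Bool), Dom_apply_source_system_strategy_multi_merge attribute_ strategyRule all_attr_infos ignore_null → Spec_apply_source_system_strategy_multi_merge attribute_ strategyRule all_attr_infos ignore_null (apply_source_system_strategy_multi_merge attribute_ strategyRule all_attr_infos ignore_null)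

-- ===== LEMMAS AND PROOFS =====

-- does this record survive A's ignore_null skip?
def pvKeep (ignore_null : Bool) (r : List (String × Option String)) : Bool :=
  !(ignore_null && (pvGet r "value" == none || pvGet r "value" == some ""))

-- the first-minimal candidate (priority, value, source) among the records
-- proof-side: the first record usable for source s (first-match semantics of the index)
def pvFindForSource (ignore_null : Bool) (s : String)
    (records : List (List (String × Option String))) : Option (List (String × Option String)) :=
  records.find? (fun r =>
    !(ignore_null && (pvGet r "value" == none || pvGet r "value" == some "")) &&
    pvGet r "source" == some s)

def pvPick (strategyRule : List String) (ignore_null : Bool) :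
    List (List (String × Option String)) → Option (Nat × Option String × String)
  | [] => none
  | r :: rs =>
    let rest := pvPick strategyRule ignore_null rs
    if pvKeep ignore_null r then
      match pvGet r "source" with
      | some s =>
        match PySem.List.index? strategyRule s with
        | some p =>
          match rest with
          | some (q, v', s') => if q < p then some (q, v', s') else some (p, pvGet r "value", s)
          | none => some (p, pvGet r "value", s)
        | none => rest
      | none => rest
    else rest

def pvMerge (st : Option String × Option String × Option Nat) :
    Option (Nat × Option String × String) → Option String × Option String × Option Nat
  | none => st
  | some (q, v, s) =>
    if (match st.2.2 with | none => true | some b => q < b) then (v, some s, some q) else st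

theorem pvFoldA_eq_merge_pick (strategyRule : List String) (ignore_null : Bool)
    (rs : List (List (String × Option String))) :
    ∀ st, rs.foldl (pvStepA strategyRule ignore_null) st
      = pvMerge st (pvPick strategyRule ignore_null rs) := by
  induction rs with
  | nil => intro st; rfl
  | cons r rs ih =>
    intro st
    simp only [List.foldl_cons, ih, pvPick]
    cases hk : (ignore_null && (pvGet r "value" == none || pvGet r "value" == some "")) with
    | true =>
      simp only [pvStepA, pvKeep, hk, Bool.not_true, Bool.false_eq_true, if_false, if_true]
    | false =>
      simp only [pvStepA, pvKeep, hk, Bool.not_false, Bool.false_eq_true, if_false, if_true]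
      cases hsrc : pvGet r "source" with
      | none => rfl
      | some s =>
        cases hidx : PySem.List.index? strategyRule s with
        | none =>
          have hc : strategyRule.contains s = false := by
            rw [← Bool.not_eq_true, List.contains_iff_mem]
            exact (PySem.List.index?_eq_none_iff strategyRule s).mp hidx
          rw [PySem.List.index?_eq_idxOf?] at hidx
          simp only [hc, PySem.List.index?_eq_idxOf?, hidx, Bool.false_eq_true, if_false]
        | some p =>
          have hc : strategyRule.contains s = true := by
            rw [List.contains_iff_mem, ← PySem.List.index?_isSome_iff strategyRule s, hidx]
            rfl
          rw [PySem.List.index?_eq_idxOf?] at hidx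
          simp only [hc, PySem.List.index?_eq_idxOf?, hidx, if_true]
          obtain ⟨bv, bs, bp⟩ := st
          cases hrest : pvPick strategyRule ignore_null rs with
          | none => cases bp <;> simp [pvMerge]
          | some t =>
            obtain ⟨q, v', s'⟩ := t
            by_cases hqp : q < p
            · cases bp with
              | none => simp [pvMerge, hqp]
              | some b =>
                by_cases hpb : p < b
                · simp [pvMerge, hqp, hpb, Nat.lt_trans hqp hpb]
                · simp [pvMerge, hqp, hpb]
            · cases bp with
              | none => simp [pvMerge, hqp]
              | some b =>
                by_cases hpb : p < b
                · simp [pvMerge, hpb, hqp]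
                · have hqb : ¬ q < b := fun h => hpb (Nat.lt_of_le_of_lt (Nat.le_of_not_lt hqp) h)
                  simp [pvMerge, hpb, hqp, hqb]
theorem pvPick_rules_nil (ignore_null : Bool)
    (rs : List (List (String × Option String))) :
    pvPick [] ignore_null rs = none := by
  induction rs with
  | nil => rfl
  | cons r rs ih =>
    unfold pvPick
    cases pvGet r "source" <;> simp [ih, PySem.List.index?]

theorem pvPick_rules_cons (ignore_null : Bool) (s : String) (rest : List String)
    (rs : List (List (String × Option String))) :
    pvPick (s :: rest) ignore_null rs
      = match pvFindForSource ignore_null s rs with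
        | some r => some (0, pvGet r "value", s)
        | none => (pvPick rest ignore_null rs).map (fun t => (t.1 + 1, t.2)) := by
  induction rs with
  | nil => rfl
  | cons r rs ih =>
    simp only [pvPick, pvFindForSource, List.find?_cons] at ih ⊢
    by_cases hk : pvKeep ignore_null r = true
    · have hkk : (ignore_null && (pvGet r "value" == none || pvGet r "value" == some "")) = false := by
        exact Bool.not_inj hk
      simp only [hk, if_true, hkk, Bool.not_false, Bool.true_and]
      cases hsrc : pvGet r "source" with
      | none =>
        
        have : ((none : Option String) == some s) = false := rfl
        simp only [this, ih]
      | some t =>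
        by_cases hts : t = s
        · subst hts
          simp only [BEq.rfl, PySem.List.index?_cons_self]
          cases hrest : pvPick (t :: rest) ignore_null rs with
          | none => rfl
          | some u =>
            obtain ⟨q, v', s'⟩ := u
            simp
        · have hbeq : ((some t : Option String) == some s) = false := by
            simp [hts]
          simp only [hbeq, ih]
          rw [PySem.List.index?_cons_of_ne rest (Ne.symm hts)]
          cases hidx : PySem.List.index? rest t with
          | none => simp only [Option.map_none]
          | some i =>
            simp only [Option.map_some]
            cases List.find? (fun r =>
                !(ignore_null && (pvGet r "value" == none || pvGet r "value" == some "")) &&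
                pvGet r "source" == some s) rs with
            | some r' => simp
            | none =>
              cases hrest : pvPick rest ignore_null rs with
              | none => rfl
              | some u =>
                obtain ⟨q, v', s'⟩ := u
                by_cases hqi : q < i
                · simp [hqi, Nat.add_lt_add_right hqi 1]
                · have h2 : ¬ q + 1 < i + 1 := by omega
                  simp [hqi, h2]
    · have hk' : pvKeep ignore_null r = false := by simpa using hk
      have hkk : (ignore_null && (pvGet r "value" == none || pvGet r "value" == some "")) = true := by
        exact Bool.not_inj hk'
      simp only [hk', Bool.false_eq_true, if_false, hkk, Bool.not_true, Bool.false_and, ih]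

theorem pvIndex_get? (ignore_null : Bool) (s : String)
    (rs : List (List (String × Option String))) :
    ∀ d, (rs.foldl (pvIndexStep ignore_null) d).get? (some s)
      = (d.get? (some s)).or (pvFindForSource ignore_null s rs) := by
  induction rs with
  | nil => intro d; simp [pvFindForSource]
  | cons r rs ih =>
    intro d
    simp only [List.foldl_cons, ih, pvIndexStep, pvFindForSource, List.find?_cons]
    cases hk : (ignore_null && (pvGet r "value" == none || pvGet r "value" == some "")) with
    | true => simp
    | false =>
      simp only [Bool.false_eq_true, if_false, Bool.not_false, Bool.true_and]
      by_cases hts : pvGet r "source" = some s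
      · have hbeq : (pvGet r "source" == some s) = true := by simp [hts]
        simp only [hts]
        by_cases hc : d.contains (some s) = true
        · simp only [hc, if_true]
          cases hg : d.get? (some s) with
          | some y => simp
          | none =>
            exact absurd hg (by simpa [hc] using
              (PySem.Dict.get?_eq_none_iff_contains d (some s)).not.mpr (by simp [hc]))
        · have hc' : d.contains (some s) = false := by simpa using hc
          have hg : d.get? (some s) = none :=
            (PySem.Dict.get?_eq_none_iff_contains d (some s)).mpr hc'
          simp [hc', hg]
      · have hbeq : (pvGet r "source" == some s) = false := by simp [hts]
        simp only [hbeq]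
        by_cases hc : d.contains (pvGet r "source") = true
        · simp [hc]
        · have hc' : d.contains (pvGet r "source") = false := by simpa using hc
          have hts' : some s ≠ pvGet r "source" := fun h => hts h.symm
          simp [hc', PySem.Dict.get?_insert, hts']

theorem pvPickBySource_eq_pick (ignore_null : Bool)
    (records : List (List (String × Option String))) (rules : List String) :
    pvPickBySource (records.foldl (pvIndexStep ignore_null) PySem.Dict.empty) rules
      = (pvPick rules ignore_null records).map (fun t => (t.2.1, t.2.2)) := by
  induction rules with
  | nil => simp [pvPickBySource, pvPick_rules_nil]
  | cons s rest ih =>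
    unfold pvPickBySource
    rw [pvPick_rules_cons, pvIndex_get?, PySem.Dict.get?_empty, Option.none_or]
    cases hfind : pvFindForSource ignore_null s records with
    | some r => simp
    | none =>
      simp only [ih]
      cases pvPick rest ignore_null records <;> simp

-- ===== VERDICT (by name: the statement is the Claim_ definition above) =====
theorem apply_source_system_strategy_multi_merge_spec : Claim_equal_apply_source_system_strategy_multi_merge := by
  intro attribute_ strategyRule all_attr_infos ignore_null _
  unfold Spec_apply_source_system_strategy_multi_merge
  unfold apply_source_system_strategy_multi_merge apply_source_system_strategy_multi_merge_alt
  simp only [pvFoldA_eq_merge_pick, pvPickBySource_eq_pick]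
  cases hpick : pvPick strategyRule ignore_null all_attr_infos with
  | none => simp [pvMerge]
  | some t =>
    obtain ⟨q, v, s⟩ := t
    cases v with
    | none =>
      simp only [pvMerge, Option.map_some]
      cases List.find? (fun r => pvFallbackOk ignore_null (pvGet r "value")) all_attr_infos <;> rfl
    | some v0 => rfl
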